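-- pv_equiv track=rewrite | github.com/happysloth0908/Algorithm-SWEA-Beakjoon- | 프로그래머스/2/42626. 더 맵게/더 맵게.py | solution
-- ===== SOURCE A (Python) =====
-- import heapq
--
-- def solution(scoville, K):
--     summ = 0
--     # scoville.sort()
--     heapq.heapify(scoville)
--     while scoville:
--         a = heapq.heappop(scoville)
--         #아직 부족함
--         if a < K:
--             if scoville:
--                 b = heapq.heappop(scoville)
--                 heapq.heappush(scoville, (a + b * 2))
--                 summ += 1
--             else:
--                 return -1
--         else:
--             return summ
--
--     return -1
-- ===== SOURCE B (Python) =====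
-- def solution(scoville, K):
--     scoville.sort()
--     n = 0
--     while scoville:
--         a = scoville.pop(0)
--         if a >= K:
--             return n
--         if not scoville:
--             return -1
--         b = scoville.pop(0)
--         x = a + b * 2
--         i = 0
--         while i < len(scoville) and scoville[i] < x:
--             i += 1
--         scoville.insert(i, x)
--         n += 1
--     return -1
-- ===== Notes on version B (the rewrite author's own statement) =====
-- stated objective: alternative
-- what changed: Replaces the binary heap with an explicitly sorted list: sort once, repeatedly pop the two head elements and re-insert the mix at its sorted insertion point; no heap is maintained.
import Mathlib
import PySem

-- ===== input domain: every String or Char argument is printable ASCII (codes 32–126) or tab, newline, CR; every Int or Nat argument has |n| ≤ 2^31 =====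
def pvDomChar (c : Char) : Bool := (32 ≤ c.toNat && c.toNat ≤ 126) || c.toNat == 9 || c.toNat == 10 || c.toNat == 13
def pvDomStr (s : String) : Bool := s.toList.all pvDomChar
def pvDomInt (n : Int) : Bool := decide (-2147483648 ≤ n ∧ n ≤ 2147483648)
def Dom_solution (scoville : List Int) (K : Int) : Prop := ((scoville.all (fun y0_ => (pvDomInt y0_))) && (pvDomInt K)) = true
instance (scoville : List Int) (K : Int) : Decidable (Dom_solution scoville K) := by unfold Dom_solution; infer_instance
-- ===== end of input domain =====

-- B replaces A's binary heap by a sort-once-then-sorted-list strategy (alternative data structure,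
-- not claimed faster). Both Pythons mutate `scoville` in place (A heapifies it, B sorts and pops it);
-- the equivalence proved here is about the RETURN value only.

-- ===== PORT A =====
-- heapq.heappop on a heap holding these contents: returns the smallest item and the remaining
-- contents.  The heap's internal array layout is abstracted to its multiset of contents, which is
-- exact for `solution`'s return value: every heapq call here only consumes/produces contents.
def heapPop (l : List Int) : Option (Int × List Int) :=
  match PySem.List.min? l (fun x => x) with
  | none => none
  | some m => some (m, l.erase m)

theorem heapPop_length {l : List Int} {a : Int} {rest : List Int}
    (h : heapPop l = some (a, rest)) : rest.length + 1 = l.length := by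
  unfold heapPop at h
  cases hm : PySem.List.min? l (fun x => x) with
  | none => simp [hm] at h
  | some m =>
    rw [hm] at h
    simp only [Option.some.injEq, Prod.mk.injEq] at h
    obtain ⟨rfl, rfl⟩ := h
    have hmem : m ∈ l := PySem.List.min?_mem hm
    have h0 : 0 < l.length := List.length_pos_of_mem hmem
    rw [List.length_erase_of_mem hmem]
    omega

-- the `while scoville:` loop of A
def loopA (K : Int) (l : List Int) (summ : Int) : Int :=
  match h : heapPop l with
  | none => -1
  | some (a, rest) =>
    if a < K then
      match h2 : heapPop rest with
      | none => -1
      | some (b, rest2) => loopA K ((a + b * 2) :: rest2) (summ + 1)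
    else summ
termination_by l.length
decreasing_by
  have e1 := heapPop_length h
  have e2 := heapPop_length h2
  simp; omega

def solution (scoville : List Int) (K : Int) : Int :=
  loopA K scoville 0

-- ===== PORT B =====
-- the inner `while i < len(scoville) and scoville[i] < x` scan followed by `insert(i, x)`:
-- walk past the elements smaller than x, insert x there
def insLoop (x : Int) : List Int → List Int
  | [] => [x]
  | y :: t => if y < x then y :: insLoop x t else x :: y :: t

theorem insLoop_length (x : Int) (l : List Int) : (insLoop x l).length = l.length + 1 := by
  induction l with
  | nil => simp [insLoop]
  | cons y t ih => simp [insLoop]; split <;> simp [ih]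

-- the outer `while scoville:` loop of B
def loopB (K : Int) (l : List Int) (n : Int) : Int :=
  match l with
  | [] => -1
  | a :: t =>
    if a ≥ K then n
    else
      match t with
      | [] => -1
      | b :: t2 => loopB K (insLoop (a + b * 2) t2) (n + 1)
termination_by l.length
decreasing_by simp [insLoop_length]

def solution_alt (scoville : List Int) (K : Int) : Int :=
  loopB K (PySem.List.sorted scoville (fun x => x) false) 0

-- ===== PRECONDITION & SPEC =====
def Spec_solution (scoville : List Int) (K : Int) (out : Int) : Prop := out = solution_alt scoville K
instance (scoville : List Int) (K : Int) (out : Int) : Decidable (Spec_solution scoville K out) := by unfold Spec_solution; infer_instance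

-- ===== CLAIM (what is proved, stated in full; the proofs are below) =====
def Claim_equal_solution : Prop := ∀ (scoville : List Int) (K : Int), Dom_solution scoville K → Spec_solution scoville K (solution scoville K)

-- ===== LEMMAS AND PROOFS =====

theorem insLoop_perm (x : Int) (l : List Int) : (insLoop x l).Perm (x :: l) := by
  induction l with
  | nil => simp [insLoop]
  | cons y t ih =>
    simp only [insLoop]
    split
    · exact ((ih.cons y).trans (List.Perm.swap x y t))
    · exact List.Perm.refl _

theorem mem_insLoop {x z : Int} {l : List Int} (h : z ∈ insLoop x l) : z = x ∨ z ∈ l := by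
  have := (insLoop_perm x l).mem_iff.mp h
  simpa using this

theorem insLoop_pairwise {x : Int} {l : List Int} (h : l.Pairwise (· ≤ ·)) :
    (insLoop x l).Pairwise (· ≤ ·) := by
  induction l with
  | nil => simp [insLoop]
  | cons y t ih =>
    rcases List.pairwise_cons.mp h with ⟨hy, ht⟩
    simp only [insLoop]
    split
    · rename_i hyx
      refine List.pairwise_cons.mpr ⟨?_, ih ht⟩
      intro z hz
      rcases mem_insLoop hz with rfl | hz'
      · exact le_of_lt hyx
      · exact hy z hz'
    · rename_i hyx
      push Not at hyx
      refine List.pairwise_cons.mpr ⟨?_, h⟩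
      intro z hz
      rcases List.mem_cons.mp hz with rfl | hz'
      · exact hyx
      · exact le_trans hyx (hy z hz')

-- on a (multiset-)permutation of a sorted list a :: t, heapPop yields a and a permutation of t
theorem heapPop_of_perm_sorted {l : List Int} {a : Int} {t : List Int}
    (hp : l.Perm (a :: t)) (hs : (a :: t).Pairwise (· ≤ ·)) :
    ∃ rest, heapPop l = some (a, rest) ∧ rest.Perm t := by
  rcases List.pairwise_cons.mp hs with ⟨ha, _⟩
  have hne : l ≠ [] := by
    intro h; subst h; exact (List.cons_ne_nil a t) hp.nil_eq.symm
  cases hm : PySem.List.min? l (fun x => x) with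
  | none =>
    rw [PySem.List.min?_eq_none_iff] at hm
    exact absurd hm hne
  | some m =>
    have hmem : m ∈ l := PySem.List.min?_mem hm
    have hmin : ∀ y ∈ l, m ≤ y := by
      intro y hy
      simpa using PySem.List.min?_isMin hm y hy
    have hma : m = a := by
      have h1 : m ≤ a := hmin a (hp.mem_iff.mpr (List.mem_cons_self))
      have h2 : a ≤ m := by
        rcases List.mem_cons.mp (hp.mem_iff.mp hmem) with rfl | hmt
        · exact le_refl _
        · exact ha m hmt
      omega
    subst hma
    refine ⟨l.erase m, ?_, ?_⟩
    · unfold heapPop; rw [hm]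
    · have := hp.erase m
      simpa [List.erase_cons_head] using this
  
theorem loopB_cons_nil (K a n : Int) : loopB K [a] n = if a ≥ K then n else -1 := by
  rw [loopB.eq_def]

theorem loopB_cons_cons (K a b n : Int) (t2 : List Int) :
    loopB K (a :: b :: t2) n = if a ≥ K then n else loopB K (insLoop (a + b * 2) t2) (n + 1) := by
  rw [loopB.eq_def]

-- the two loops agree on permutation-equal states, B's being sorted
theorem loop_eq : ∀ (n : Nat) (l m : List Int) (K cnt : Int),
    l.length = n → m.Perm l → m.Pairwise (· ≤ ·) → loopA K l cnt = loopB K m cnt := by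
  intro n
  induction n with
  | zero =>
    intro l m K cnt hlen hp _
    have hl : l = [] := List.length_eq_zero_iff.mp hlen
    subst hl
    have hm : m = [] := hp.eq_nil
    subst hm
    simp [loopA, loopB, heapPop, PySem.List.min?]
  | succ k ih =>
    intro l m K cnt hlen hp hs
    cases m with
    | nil =>
      exact absurd (hp.length_eq ▸ hlen) (by simp)
    | cons a t =>
      rcases heapPop_of_perm_sorted hp.symm hs with ⟨rest, hpop, hrest⟩
      have hst : t.Pairwise (· ≤ ·) := (List.pairwise_cons.mp hs).2
      cases t with
      | nil =>
        rw [loopA.eq_def, loopB_cons_nil]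
        split
        · rename_i h2
          rw [hpop] at h2
          simp at h2
        · rename_i h2
          rw [hpop] at h2
          simp only [Option.some.injEq, Prod.mk.injEq] at h2
          obtain ⟨rfl, rfl⟩ := h2
          have : rest = [] := hrest.eq_nil
          subst this
          by_cases hK : a < K
          · rw [if_pos hK, if_neg (by omega)]
            simp [heapPop, PySem.List.min?]
          · rw [if_neg hK, if_pos (by omega)]
      | cons b t2 =>
        rw [loopA.eq_def, loopB_cons_cons]
        split
        · rename_i h2
          rw [hpop] at h2
          simp at h2
        · rename_i h2
          rw [hpop] at h2
          simp only [Option.some.injEq, Prod.mk.injEq] at h2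
          obtain ⟨rfl, rfl⟩ := h2
          by_cases hK : a < K
          · rw [if_pos hK, if_neg (by omega)]
            rcases heapPop_of_perm_sorted hrest hst with ⟨rest2, hpop2, hrest2⟩
            split
            · rename_i h3
              rw [hpop2] at h3
              simp at h3
            · rename_i h3
              rw [hpop2] at h3
              simp only [Option.some.injEq, Prod.mk.injEq] at h3
              obtain ⟨rfl, rfl⟩ := h3
              exact ih _ _ _ _
                (by have e1 := heapPop_length hpop
                    have e2 := heapPop_length hpop2
                    simp; omega)
                ((insLoop_perm _ t2).trans (hrest2.symm.cons _))
                (insLoop_pairwise (List.pairwise_cons.mp hst).2)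
          · rw [if_neg hK, if_pos (by omega)]

-- ===== VERDICT (by name: the statement is the Claim_ definition above) =====
theorem solution_spec : Claim_equal_solution := by
  intro scoville K _
  unfold Spec_solution solution solution_alt
  exact loop_eq scoville.length scoville _ K 0 rfl
    (PySem.List.sorted_perm scoville (fun x => x) false)
    (by simpa using PySem.List.sorted_pairwise scoville (fun x => x))
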